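-- pv_equiv track=rewrite | github.com/strah19/6502 | scripts/frequency_solver.py | calc_coarse
-- ===== SOURCE A (Python) =====
-- MAX_COURSE_TUNER = 15
--
-- def calc_coarse(tp):
--     coarse_counter = 0
--     ct = 0
--     while coarse_counter <= MAX_COURSE_TUNER:
--         coarse_counter += 1
--         possible_ct = coarse_counter * 256
--         if (abs(possible_ct - tp) < abs(ct - tp)) and (possible_ct <= tp):
--             ct = coarse_counter
--
--     return ct
-- ===== SOURCE B (Python) =====
-- def calc_coarse(tp):
--     return min(16, max(0, tp // 256))
-- ===== Notes on version B (the rewrite author's own statement) =====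
-- stated objective: simpler
-- what changed: Replaced the 16-iteration search loop with a closed-form clamp: the result is the largest multiple-index of 256 not exceeding tp, clamped to [0,16], i.e. min(16, max(0, tp // 256)).
import Mathlib
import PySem

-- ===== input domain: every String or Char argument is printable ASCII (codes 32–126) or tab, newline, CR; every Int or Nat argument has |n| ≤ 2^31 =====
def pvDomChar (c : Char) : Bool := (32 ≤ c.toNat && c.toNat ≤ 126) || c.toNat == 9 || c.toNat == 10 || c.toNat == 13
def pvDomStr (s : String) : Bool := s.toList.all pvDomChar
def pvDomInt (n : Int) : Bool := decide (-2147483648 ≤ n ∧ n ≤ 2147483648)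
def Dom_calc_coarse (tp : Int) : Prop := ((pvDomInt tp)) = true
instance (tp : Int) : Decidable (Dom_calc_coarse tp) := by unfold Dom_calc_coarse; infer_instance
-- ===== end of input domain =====

-- B replaces A's 16-iteration search loop with a closed-form clamp min(16, max(0, tp // 256)) (simpler; same value everywhere).

-- ===== PORT A =====
-- the while loop of A: state (coarse_counter, ct), runs while coarse_counter ≤ MAX_COURSE_TUNER = 15
def calcCoarseLoop (tp coarse_counter ct : Int) : Int :=
  if _h : coarse_counter ≤ 15 then
    let cc := coarse_counter + 1
    let possible_ct := cc * 256
    calcCoarseLoop tp cc (if |possible_ct - tp| < |ct - tp| ∧ possible_ct ≤ tp then cc else ct)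
  else ct
termination_by (16 - coarse_counter).toNat
decreasing_by omega

def calc_coarse (tp : Int) : Int := calcCoarseLoop tp 0 0

-- ===== PORT B =====
def calc_coarse_alt (tp : Int) : Int := min 16 (max 0 (PySem.Int.floordiv tp 256))

-- ===== PRECONDITION & SPEC =====
def Spec_calc_coarse (tp : Int) (out : Int) : Prop := out = calc_coarse_alt tp
instance (tp : Int) (out : Int) : Decidable (Spec_calc_coarse tp out) := by unfold Spec_calc_coarse; infer_instance

-- ===== CLAIM (what is proved, stated in full; the proofs are below) =====
def Claim_equal_calc_coarse : Prop := ∀ (tp : Int), Dom_calc_coarse tp → Spec_calc_coarse tp (calc_coarse tp)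

-- ===== LEMMAS AND PROOFS =====

-- loop invariant: with counter 16 - n and best-so-far clamped at 16 - n, the loop returns the full clamp
theorem calcCoarseLoop_inv (tp : Int) (n : Nat) (hn : n ≤ 16) :
    calcCoarseLoop tp (16 - (n : Int)) (min (16 - (n : Int)) (max 0 (PySem.Int.floordiv tp 256)))
      = min 16 (max 0 (PySem.Int.floordiv tp 256)) := by
  induction n with
  | zero =>
      rw [calcCoarseLoop]
      norm_num
  | succ k ih =>
      have hk : k ≤ 16 := by omega
      have hq : (16 - (k : Int)) ≤ PySem.Int.floordiv tp 256 ↔ (16 - (k : Int)) * 256 ≤ tp :=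
        PySem.Int.le_floordiv_iff_mul_le (by norm_num)
      rw [calcCoarseLoop]
      have hc : (16 - ((k : Int) + 1)) ≤ 15 := by omega
      simp only [Nat.cast_succ, hc, dif_pos]
      have harith : (16 - ((k : Int) + 1) + 1) = 16 - (k : Int) := by ring
      rw [harith]
      have hstep :
          (if |(16 - (k : Int)) * 256 - tp| < |min (16 - ((k : Int) + 1)) (max 0 (PySem.Int.floordiv tp 256)) - tp| ∧
                (16 - (k : Int)) * 256 ≤ tp
           then 16 - (k : Int)
           else min (16 - ((k : Int) + 1)) (max 0 (PySem.Int.floordiv tp 256)))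
          = min (16 - (k : Int)) (max 0 (PySem.Int.floordiv tp 256)) := by
        set q : Int := PySem.Int.floordiv tp 256 with hqdef
        split_ifs with h
        · -- accepted: 256*(16-k) ≤ tp, so 16-k ≤ q and the clamp is 16-k
          have h2 : (16 - (k : Int)) ≤ q := hq.mpr h.2
          omega
        · -- rejected: must be because 256*(16-k) > tp, i.e. q < 16-k
          by_cases h2 : (16 - (k : Int)) * 256 ≤ tp
          · exfalso
            apply h
            constructor
            · have hctle : min (16 - ((k : Int) + 1)) (max 0 q) < (16 - (k : Int)) * 256 := by omega
              have hct0 : 0 ≤ min (16 - ((k : Int) + 1)) (max 0 q) := by omega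
              rw [abs_of_nonpos (by omega), abs_of_nonpos (by omega)]
              omega
            · exact h2
          · have h3 : ¬ ((16 - (k : Int)) ≤ q) := fun hle => h2 (hq.mp hle)
            omega
      rw [hstep]
      exact ih hk

-- ===== VERDICT (by name: the statement is the Claim_ definition above) =====
theorem calc_coarse_spec : Claim_equal_calc_coarse := by
  intro tp _
  unfold Spec_calc_coarse calc_coarse calc_coarse_alt
  have h := calcCoarseLoop_inv tp 16 (by norm_num)
  have h0 : min (16 - ((16 : Nat) : Int)) (max 0 (PySem.Int.floordiv tp 256)) = 0 := by
    have : (0 : Int) ≤ max 0 (PySem.Int.floordiv tp 256) := le_max_left _ _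
    omega
  rw [h0] at h
  simpa using h
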